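-- pv_equiv track=rewrite | github.com/vsantsal/matematica-combinatoria-ence | exercicios/aula_05.py | numero_combinacoes_com_restricao_para_identidade_elementos
-- ===== SOURCE A (Python) =====
-- from itertools import combinations
-- from typing import Iterable
--
-- def numero_combinacoes_com_restricao_para_identidade_elementos(iteravel: Iterable,
--                                                                escolhas: int,
--                                                                valor_alvo,
--                                                                quantidade: int) -> int:
--     combins = combinations(iteravel, escolhas)
--     contador = 0
--     for comb in combins:
--         elementos = [el for el in comb if el == valor_alvo]
--         if len(elementos) == quantidade:
--             contador += 1
--     return contador
-- ===== SOURCE B (Python) =====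
-- def _comb(n, r):
--     if r < 0 or r > n:
--         return 0
--     num = 1
--     for i in range(r):
--         num *= n - i
--     den = 1
--     for i in range(r):
--         den *= i + 1
--     return num // den
--
--
-- def numero_combinacoes_com_restricao_para_identidade_elementos(iteravel,
--                                                                escolhas,
--                                                                valor_alvo,
--                                                                quantidade):
--     xs = list(iteravel)
--     k = xs.count(valor_alvo)
--     m = len(xs)
--     return _comb(k, quantidade) * _comb(m - k, escolhas - quantidade)
-- ===== Notes on version B (the rewrite author's own statement) =====
-- stated objective: faster
-- what changed: Instead of enumerating all C(m,escolhas) combinations and filtering, B counts occurrences k of valor_alvo once and returns the closed form C(k,quantidade)*C(m-k,escolhas-quantidade); intended as faster (measured 10.31x at n=16; A timed out at n=64 where B returned, so the largest-size ratio could not be confirmed).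
import Mathlib
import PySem

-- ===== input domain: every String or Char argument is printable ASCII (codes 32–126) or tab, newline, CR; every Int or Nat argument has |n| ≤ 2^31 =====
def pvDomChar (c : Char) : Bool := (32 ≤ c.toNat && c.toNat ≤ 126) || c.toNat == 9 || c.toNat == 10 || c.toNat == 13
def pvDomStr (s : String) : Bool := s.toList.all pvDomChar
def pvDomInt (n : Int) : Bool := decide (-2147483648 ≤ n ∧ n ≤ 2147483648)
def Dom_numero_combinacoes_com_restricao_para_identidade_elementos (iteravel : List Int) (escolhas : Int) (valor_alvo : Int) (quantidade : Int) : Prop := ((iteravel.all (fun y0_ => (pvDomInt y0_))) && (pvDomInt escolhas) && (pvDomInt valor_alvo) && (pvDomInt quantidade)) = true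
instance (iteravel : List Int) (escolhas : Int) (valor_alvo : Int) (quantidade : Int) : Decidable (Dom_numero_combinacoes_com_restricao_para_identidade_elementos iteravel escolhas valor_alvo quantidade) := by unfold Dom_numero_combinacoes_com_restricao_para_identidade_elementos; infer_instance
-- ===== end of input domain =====

-- B replaces A's enumeration of all combinations by the closed form C(k,quantidade)*C(m-k,escolhas-quantidade)
-- where k counts valor_alvo; intended as faster (measured 10.31x at n=16; A timed out at n=64 where B returned).


-- ===== PORT A =====
-- itertools.combinations(xs, n): all length-n combinations, in itertools' order
def pvCombs : List Int → Nat → List (List Int)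
  | _, 0 => [[]]
  | [], _ + 1 => []
  | x :: xs, n + 1 => (pvCombs xs n).map (fun c => x :: c) ++ pvCombs xs (n + 1)

def numero_combinacoes_com_restricao_para_identidade_elementos (iteravel : List Int) (escolhas : Int) (valor_alvo : Int) (quantidade : Int) : Int :=
  -- combins = combinations(iteravel, escolhas); escolhas < 0 raises in Python (outside Pre_)
  let combins := pvCombs iteravel escolhas.toNat
  combins.foldl
    (fun contador comb =>
      let elementos := comb.filter (fun el => el == valor_alvo)
      if ((elementos.length : Int) = quantidade) then contador + 1 else contador)
    0

-- ===== PORT B =====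
-- _comb from Source B: guarded product-of-falling-factors // product-of-1..r
def pvCombB (n r : Int) : Int :=
  if r < 0 ∨ n < r then 0
  else
    let num := (PySem.List.pyRange 0 r 1).foldl (fun a i => a * (n - i)) 1
    let den := (PySem.List.pyRange 0 r 1).foldl (fun a i => a * (i + 1)) 1
    PySem.Int.floordiv num den

def numero_combinacoes_com_restricao_para_identidade_elementos_alt (iteravel : List Int) (escolhas : Int) (valor_alvo : Int) (quantidade : Int) : Int :=
  let k : Int := (iteravel.count valor_alvo : Int)
  let m : Int := (iteravel.length : Int)
  pvCombB k quantidade * pvCombB (m - k) (escolhas - quantidade)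

-- ===== PRECONDITION & SPEC =====
-- Pre_ excludes exactly escolhas < 0, where A's itertools.combinations raises ValueError.
def Pre_numero_combinacoes_com_restricao_para_identidade_elementos (iteravel : List Int) (escolhas : Int) (valor_alvo : Int) (quantidade : Int) : Prop := 0 ≤ escolhas
instance (iteravel : List Int) (escolhas : Int) (valor_alvo : Int) (quantidade : Int) : Decidable (Pre_numero_combinacoes_com_restricao_para_identidade_elementos iteravel escolhas valor_alvo quantidade) := by unfold Pre_numero_combinacoes_com_restricao_para_identidade_elementos; infer_instance

def pvWitness_numero_combinacoes_com_restricao_para_identidade_elementos : List Int × Int × Int × Int := ([1, 2, 2, 3], 2, 2, 1)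

def Spec_numero_combinacoes_com_restricao_para_identidade_elementos (iteravel : List Int) (escolhas : Int) (valor_alvo : Int) (quantidade : Int) (out : Int) : Prop := out = numero_combinacoes_com_restricao_para_identidade_elementos_alt iteravel escolhas valor_alvo quantidade
instance (iteravel : List Int) (escolhas : Int) (valor_alvo : Int) (quantidade : Int) (out : Int) : Decidable (Spec_numero_combinacoes_com_restricao_para_identidade_elementos iteravel escolhas valor_alvo quantidade out) := by unfold Spec_numero_combinacoes_com_restricao_para_identidade_elementos; infer_instance

-- ===== CLAIM (what is proved, stated in full; the proofs are below) =====
def Claim_equal_numero_combinacoes_com_restricao_para_identidade_elementos : Prop := ∀ (iteravel : List Int) (escolhas : Int) (valor_alvo : Int) (quantidade : Int), Dom_numero_combinacoes_com_restricao_para_identidade_elementos iteravel escolhas valor_alvo quantidade → Pre_numero_combinacoes_com_restricao_para_identidade_elementos iteravel escolhas valor_alvo quantidade → Spec_numero_combinacoes_com_restricao_para_identidade_elementos iteravel escolhas valor_alvo quantidade (numero_combinacoes_com_restricao_para_identidade_elementos iteravel escolhas valor_alvo quantidade)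

-- ===== LEMMAS AND PROOFS =====

-- A's counting loop is a countP
lemma pv_foldl_ite_count (p : List Int → Prop) [DecidablePred p] :
    ∀ (l : List (List Int)) (a : Int),
      l.foldl (fun acc c => if p c then acc + 1 else acc) a
        = a + (l.countP (fun c => decide (p c)) : Int) := by
  intro l
  induction l with
  | nil => intro a; simp
  | cons c l ih =>
      intro a
      by_cases h : p c <;> simp [List.countP_cons, h, ih] <;> ring

lemma pvCombs_length : ∀ (xs : List Int) (e : Nat) (c : List Int),
    c ∈ pvCombs xs e → c.length = e := by
  intro xs
  induction xs with
  | nil =>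
      intro e c hc
      cases e with
      | zero => simp [pvCombs] at hc; simp [hc]
      | succ n => simp [pvCombs] at hc
  | cons x xs ih =>
      intro e c hc
      cases e with
      | zero => simp [pvCombs] at hc; simp [hc]
      | succ n =>
          simp [pvCombs] at hc
          rcases hc with ⟨d, hd, rfl⟩ | hc
          · simp [ih n d hd]
          · exact ih (n + 1) c hc

lemma pvCombs_countP_zero (v : Int) (xs : List Int) (e q : Nat) (h : e < q) :
    (pvCombs xs e).countP (fun c => c.count v == q) = 0 := by
  rw [List.countP_eq_zero]
  intro c hc
  have h1 : c.count v ≤ c.length := List.count_le_length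
  have h2 := pvCombs_length xs e c hc
  simp
  omega

lemma pvCombs_countP (v : Int) : ∀ (xs : List Int) (e q : Nat), q ≤ e →
    (pvCombs xs e).countP (fun c => c.count v == q)
      = Nat.choose (xs.count v) q * Nat.choose (xs.length - xs.count v) (e - q) := by
  intro xs
  induction xs with
  | nil =>
      intro e q hq
      cases e with
      | zero =>
          interval_cases q
          simp [pvCombs]
      | succ n =>
          rcases Nat.eq_zero_or_pos q with rfl | hq0
          · simp [pvCombs, Nat.choose_zero_succ]
          · have : Nat.choose 0 q = 0 := by
              cases q with
              | zero => omega
              | succ m => exact Nat.choose_zero_succ m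
            simp [pvCombs, this]
  | cons x xs ih =>
      intro e q hq
      cases e with
      | zero =>
          interval_cases q
          simp [pvCombs]
      | succ s =>
          have hk : xs.count v ≤ xs.length := List.count_le_length
          rw [show pvCombs (x :: xs) (s + 1)
                = (pvCombs xs s).map (fun c => x :: c) ++ pvCombs xs (s + 1) from rfl]
          rw [List.countP_append, List.countP_map]
          by_cases hx : x = v
          · subst hx
            have hcnt : ∀ c : List Int, (x :: c).count x = c.count x + 1 := by
              intro c; simp [List.count_cons]
            have hc1 : (x :: xs).count x = xs.count x + 1 := hcnt xs
            cases q with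
            | zero =>
                have h0 : ((pvCombs xs s).countP ((fun c => c.count x == 0) ∘ (fun c => x :: c))) = 0 := by
                  rw [List.countP_eq_zero]
                  intro c _
                  simp [hcnt]
                rw [h0, ih (s + 1) 0 (by omega), hc1, List.length_cons]
                have e2 : xs.length + 1 - (xs.count x + 1) = xs.length - xs.count x := by omega
                rw [e2]
                simp [Nat.choose_zero_right]
            | succ q' =>
                have hfun : ((pvCombs xs s).countP ((fun c => c.count x == (q' + 1)) ∘ (fun c => x :: c)))
                    = (pvCombs xs s).countP (fun c => c.count x == q') := by
                  apply List.countP_congr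
                  intro c _
                  simp [hcnt]
                rw [hfun, ih s q' (by omega), ih (s + 1) (q' + 1) hq, hc1, List.length_cons]
                have e1 : s + 1 - (q' + 1) = s - q' := by omega
                have e2 : xs.length + 1 - (xs.count x + 1) = xs.length - xs.count x := by omega
                rw [e1, e2, Nat.choose_succ_succ, Nat.add_mul]
          · have hcnt : ∀ c : List Int, (x :: c).count v = c.count v := by
              intro c; simp [List.count_cons, hx]
            have hfun : ((pvCombs xs s).countP ((fun c => c.count v == q) ∘ (fun c => x :: c)))
                = (pvCombs xs s).countP (fun c => c.count v == q) := by
              apply List.countP_congr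
              intro c _
              simp [hcnt]
            rw [hfun, hcnt xs, List.length_cons]
            rcases Nat.lt_or_ge s q with hlt | hle
            · -- q = s + 1
              have hq' : q = s + 1 := by omega
              subst hq'
              rw [pvCombs_countP_zero v xs s (s + 1) (by omega), ih (s + 1) (s + 1) le_rfl]
              have e1 : s + 1 - (s + 1) = 0 := by omega
              have e2 : xs.length + 1 - xs.count v - 0 = (xs.length - xs.count v) + 1 - 0 := by omega
              simp [e1]
            · rw [ih s q hle, ih (s + 1) q (by omega)]
              have e2 : xs.length + 1 - xs.count v = (xs.length - xs.count v) + 1 := by omega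
              have e3 : s + 1 - q = (s - q) + 1 := by omega
              rw [e2, e3, Nat.choose_succ_succ, Nat.mul_add]

lemma pvCombB_num (n : Int) : ∀ (r : Nat), (r : Int) ≤ n →
    (PySem.List.pyRange 0 (r : Int) 1).foldl (fun a i => a * (n - i)) 1
      = (Nat.descFactorial n.toNat r : Int) := by
  intro r
  induction r with
  | zero => intro _; simp [PySem.List.pyRange_zero_nat]
  | succ m ih =>
      intro h
      have hb : ((m + 1 : Nat) : Int) = (m : Int) + 1 := by push_cast; ring
      have h' : (m : Int) ≤ n := by omega
      rw [hb, PySem.List.pyRange_one_succ_right (by positivity), List.foldl_append, ih h']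
      simp only [List.foldl]
      rw [Nat.descFactorial_succ, Nat.cast_mul]
      have hc : ((n.toNat - m : Nat) : Int) = n - m := by omega
      rw [hc]
      ring

lemma pvCombB_den : ∀ (r : Nat),
    (PySem.List.pyRange 0 (r : Int) 1).foldl (fun a i => a * (i + 1)) 1
      = (Nat.factorial r : Int) := by
  intro r
  induction r with
  | zero => simp [PySem.List.pyRange_zero_nat, Nat.factorial]
  | succ m ih =>
      have hb : ((m + 1 : Nat) : Int) = (m : Int) + 1 := by push_cast; ring
      rw [hb, PySem.List.pyRange_one_succ_right (by positivity), List.foldl_append, ih]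
      simp only [List.foldl]
      rw [Nat.factorial_succ, Nat.cast_mul]
      push_cast
      ring

lemma pvCombB_choose (n r : Int) (hn : 0 ≤ n) (hr : 0 ≤ r) :
    pvCombB n r = (Nat.choose n.toNat r.toNat : Int) := by
  unfold pvCombB
  by_cases h : n < r
  · have : n.toNat < r.toNat := by omega
    simp [hr.not_gt, h, Nat.choose_eq_zero_of_lt this]
  · push_neg at h
    have hrn : (r.toNat : Int) = r := by omega
    simp only [if_neg (by push_neg; exact ⟨hr, h⟩ : ¬ (r < 0 ∨ n < r))]
    rw [← hrn, pvCombB_num n r.toNat (by omega), pvCombB_den r.toNat]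
    rw [PySem.Int.floordiv_natCast]
    rw [Nat.choose_eq_descFactorial_div_factorial, Int.toNat_natCast]

-- ===== VERDICT (by name: the statement is the Claim_ definition above) =====
theorem numero_combinacoes_com_restricao_para_identidade_elementos_spec : Claim_equal_numero_combinacoes_com_restricao_para_identidade_elementos := by
  intro iteravel escolhas valor_alvo quantidade hdom hpre
  have hpre' : (0 : Int) ≤ escolhas := hpre
  unfold Spec_numero_combinacoes_com_restricao_para_identidade_elementos
  unfold numero_combinacoes_com_restricao_para_identidade_elementos
  unfold numero_combinacoes_com_restricao_para_identidade_elementos_alt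
  simp only []
  rw [pv_foldl_ite_count (fun c => (((c.filter (fun el => el == valor_alvo)).length : Int) = quantidade))]
  have hk : iteravel.count valor_alvo ≤ iteravel.length := List.count_le_length
  have hfilt : ∀ c : List Int, (c.filter (fun el => el == valor_alvo)).length = c.count valor_alvo := by
    intro c; rw [List.count, List.countP_eq_length_filter]
  by_cases hq : quantidade < 0
  · have h0 : (pvCombs iteravel escolhas.toNat).countP
        (fun c => decide (((c.filter (fun el => el == valor_alvo)).length : Int) = quantidade)) = 0 := by
      rw [List.countP_eq_zero]
      intro c _
      simp only [decide_eq_true_eq]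
      intro hcontra
      omega
    rw [h0]
    have : pvCombB (iteravel.count valor_alvo : Int) quantidade = 0 := by
      unfold pvCombB; simp [hq]
    simp [this]
  · push_neg at hq
    have hcongr : (pvCombs iteravel escolhas.toNat).countP
        (fun c => decide (((c.filter (fun el => el == valor_alvo)).length : Int) = quantidade))
        = (pvCombs iteravel escolhas.toNat).countP (fun c => c.count valor_alvo == quantidade.toNat) := by
      apply List.countP_congr
      intro c _
      simp [hfilt c]
      omega
    rw [hcongr]
    by_cases hle : quantidade ≤ escolhas
    · rw [pvCombs_countP valor_alvo iteravel escolhas.toNat quantidade.toNat (by omega)]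
      rw [pvCombB_choose _ _ (by positivity) hq,
          pvCombB_choose _ _ (by omega) (by omega)]
      have e1 : ((iteravel.count valor_alvo : Int)).toNat = iteravel.count valor_alvo := by omega
      have e2 : ((iteravel.length : Int) - (iteravel.count valor_alvo : Int)).toNat
          = iteravel.length - iteravel.count valor_alvo := by omega
      have e3 : (escolhas - quantidade).toNat = escolhas.toNat - quantidade.toNat := by omega
      rw [e1, e2, e3]
      push_cast
      ring
    · push_neg at hle
      rw [pvCombs_countP_zero valor_alvo iteravel escolhas.toNat quantidade.toNat (by omega)]
      have : pvCombB ((iteravel.length : Int) - (iteravel.count valor_alvo : Int)) (escolhas - quantidade) = 0 := by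
        unfold pvCombB; simp; intro h; omega
      simp [this]
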